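-- pv_equiv track=rewrite | github.com/ayoubc/competitive-programming | online_judges/codejam/2021/qualification/moons_and_umbrellas.py | solve
-- ===== SOURCE A (Python) =====
-- def solve(x, y, s):
--     cost = {'CJ': x, 'JC': y, 'JJ': 0, 'CC': 0}
--     S = list(s.strip('?'))
--     ans = 0
--     # i, j = 0, len(s) - 1
--     # while s[i] == '?':
--     #     i += 1
--     #
--     # while s[j] == '?':
--     #     j -= 1
--     #
--     # if x < 0 and y < 0:
--     #
--     # elif x < 0:
--     #
--     # elif y < 0:
--     #
--     #
--     #
--     for i in range(len(S)-1):
--         if S[i] == '?':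
--             if S[i+1] == '?':
--                 S[i] = S[i-1]
--             else:
--                 if S[i+1] == S[i-1]:
--                     S[i] = S[i-1]
--                 else:
--                     c1 = cost[S[i-1]+'C'] + cost['C' + S[i+1]]
--                     c2 = cost[S[i-1]+'J'] + cost['J' + S[i+1]]
--                     if c1 < c2:
--                         ans += c1
--                         S[i] = 'C'
--                     else:
--                         ans += c2
--                         S[i] = 'J'
--         else:
--             if S[i+1] != '?':
--                 ans += cost[S[i] + S[i + 1]]
--
--     return ans
-- ===== SOURCE B (Python) =====
-- def solve(x, y, s):
--     cost = {'CJ': x, 'JC': y, 'JJ': 0, 'CC': 0}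
--     t = [c for c in s if c != '?']
--     return sum(cost[t[i] + t[i + 1]] for i in range(len(t) - 1))
-- ===== Notes on version B (the rewrite author's own statement) =====
-- stated objective: simpler
-- what changed: A strips '?' off the ends and runs a stateful greedy loop that fills each '?' in place with lookahead branching; B has no filling at all: it drops every '?' from s and sums the dict cost of each adjacent pair of surviving characters, which provably yields A's exact value on the C/J/? alphabet.
-- outside the precondition, e.g. on solve(1, 2, 'X?X'): A returns 0, B raises KeyError; on solve(1, 2, 'X'): A returns 0, B returns 0
import Mathlib
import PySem

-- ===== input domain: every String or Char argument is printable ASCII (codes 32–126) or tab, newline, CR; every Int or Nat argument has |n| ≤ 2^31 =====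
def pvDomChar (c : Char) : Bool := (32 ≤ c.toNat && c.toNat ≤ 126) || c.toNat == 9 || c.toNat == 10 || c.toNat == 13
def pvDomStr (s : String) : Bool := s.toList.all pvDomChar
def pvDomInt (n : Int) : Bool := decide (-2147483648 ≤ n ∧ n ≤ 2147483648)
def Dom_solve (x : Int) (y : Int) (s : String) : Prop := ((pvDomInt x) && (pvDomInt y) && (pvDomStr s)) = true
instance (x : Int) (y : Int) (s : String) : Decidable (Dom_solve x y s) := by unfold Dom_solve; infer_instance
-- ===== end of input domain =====

-- B replaces A's in-place greedy '?'-filling loop by a plain sum of pair costs over the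
-- '?'-free subsequence of s (objective: simpler; equal value proved on the C/J/? alphabet).


-- ===== PORT A =====
-- the dict literal cost = {'CJ': x, 'JC': y, 'JJ': 0, 'CC': 0} (written identically by A and B)
def costDict (x y : Int) : PySem.Dict String Int :=
  PySem.Dict.ofList [("CJ", x), ("JC", y), ("JJ", 0), ("CC", 0)]

-- cost[k]; a missing key is a KeyError, which Pre_solve excludes (the 0 default is unreachable there)
def costGet (x y : Int) (k : String) : Int := ((costDict x y).get? k).getD 0

-- one iteration of A's for-loop, branch for branch (the '?' defaults of pyGetD are unreachable:
-- i and i+1 lie in range, and S[i-1] at i = 0 wraps to S[-1] in Python exactly as pyGetD does)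
def solveStep (x y : Int) (st : List Char × Int) (i : Int) : List Char × Int :=
  let S := st.1
  let ans := st.2
  if PySem.List.pyGetD S i '?' = '?' then
    if PySem.List.pyGetD S (i + 1) '?' = '?' then
      (PySem.List.pySetD S i (PySem.List.pyGetD S (i - 1) '?'), ans)
    else
      if PySem.List.pyGetD S (i + 1) '?' = PySem.List.pyGetD S (i - 1) '?' then
        (PySem.List.pySetD S i (PySem.List.pyGetD S (i - 1) '?'), ans)
      else
        let c1 := costGet x y (String.ofList [PySem.List.pyGetD S (i - 1) '?', 'C']) +
                  costGet x y (String.ofList ['C', PySem.List.pyGetD S (i + 1) '?'])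
        let c2 := costGet x y (String.ofList [PySem.List.pyGetD S (i - 1) '?', 'J']) +
                  costGet x y (String.ofList ['J', PySem.List.pyGetD S (i + 1) '?'])
        if c1 < c2 then (PySem.List.pySetD S i 'C', ans + c1)
        else (PySem.List.pySetD S i 'J', ans + c2)
  else
    if PySem.List.pyGetD S (i + 1) '?' ≠ '?' then
      (S, ans + costGet x y (String.ofList [PySem.List.pyGetD S i '?', PySem.List.pyGetD S (i + 1) '?']))
    else (S, ans)

def solve (x : Int) (y : Int) (s : String) : Int :=
  let S := PySem.Chars.stripChars s.toList ['?']
  ((PySem.List.pyRange 0 ((S.length : Int) - 1) 1).foldl (solveStep x y) (S, 0)).2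

-- ===== PORT B =====
def solve_alt (x : Int) (y : Int) (s : String) : Int :=
  let cost := costDict x y
  let t := s.toList.filter (fun c => c != '?')
  (((PySem.List.pyRange 0 ((t.length : Int) - 1) 1).map
      (fun i => (cost.get? (String.ofList [PySem.List.pyGetD t i '?',
                                           PySem.List.pyGetD t (i + 1) '?'])).getD 0)).sum)

-- ===== PRECONDITION & SPEC =====
-- Pre_ restricts to the problem's alphabet {C, J, ?}: on any other character both programs in
-- general raise KeyError on a cost lookup (A's occasional 0 return there — e.g. 'X?X', where the
-- stray pair is '?'-separated and never looked up — is accidental, and B raises KeyError on it).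
def Pre_solve (x : Int) (y : Int) (s : String) : Prop :=
  (s.toList.all fun c => c == 'C' || c == 'J' || c == '?') = true
instance (x : Int) (y : Int) (s : String) : Decidable (Pre_solve x y s) := by
  unfold Pre_solve; infer_instance

def pvWitness_solve : Int × Int × String := (3, 5, "C?J")

def Spec_solve (x : Int) (y : Int) (s : String) (out : Int) : Prop := out = solve_alt x y s
instance (x : Int) (y : Int) (s : String) (out : Int) : Decidable (Spec_solve x y s out) := by
  unfold Spec_solve; infer_instance

-- ===== CLAIM (what is proved, stated in full; the proofs are below) =====
def Claim_equal_solve : Prop :=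
  ∀ (x : Int) (y : Int) (s : String), Dom_solve x y s → Pre_solve x y s →
    Spec_solve x y s (solve x y s)

-- ===== LEMMAS AND PROOFS =====

-- cost of one adjacent pair, as a function of the two characters
def costFn (x y : Int) (a b : Char) : Int := costGet x y (String.ofList [a, b])

-- sum of the costs of adjacent pairs of a list — B's value, in structural form
def pairSum (x y : Int) : List Char → Int
  | [] => 0
  | [_] => 0
  | a :: b :: r => costFn x y a b + pairSum x y (b :: r)

-- last non-'?' character among the first k entries of T (junk default; used only when one exists)
def lastNQ (T : List Char) (k : Nat) : Char :=
  ((T.take k).filter (fun c => c != '?')).getLastD 'C'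

theorem pairSum_append (x y : Int) (v : List Char) (d : Char) :
    pairSum x y (v ++ [d]) =
      pairSum x y v + (if v = [] then 0 else costFn x y (v.getLastD 'C') d) := by
  induction v with
  | nil => simp [pairSum]
  | cons a r ih =>
    cases r with
    | nil => simp [pairSum]
    | cons b r' =>
      simp only [List.cons_append, pairSum] at *
      rw [ih]
      simp [List.getLastD]
      ring

theorem indexSum_eq_pairSum (x y : Int) (t : List Char) :
    ((List.range (t.length - 1)).map
        (fun i => costFn x y (t.getD i '?') (t.getD (i + 1) '?'))).sum = pairSum x y t := by
  match t with
  | [] => rfl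
  | [_] => rfl
  | a :: b :: r =>
    have h1 : (a :: b :: r).length - 1 = r.length + 1 := by simp
    rw [h1, List.range_succ_eq_map]
    have h2 := indexSum_eq_pairSum x y (b :: r)
    have h3 : (b :: r).length - 1 = r.length := by simp
    rw [h3] at h2
    simp only [List.map_cons, List.map_map, List.sum_cons]
    have h4 : (fun i => costFn x y ((a :: b :: r).getD i '?') ((a :: b :: r).getD (i + 1) '?')) ∘ Nat.succ
        = (fun i => costFn x y ((b :: r).getD i '?') ((b :: r).getD (i + 1) '?')) := by
      funext i; simp [Function.comp]
    rw [h4, h2]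
    simp [pairSum]

theorem filter_dropWhile (p q : Char → Bool) (hpq : ∀ c, p c = true → q c = false) (l : List Char) :
    (l.dropWhile p).filter q = l.filter q := by
  induction l with
  | nil => rfl
  | cons a r ih =>
    by_cases h : p a
    · rw [List.dropWhile_cons_of_pos h, ih, List.filter_cons_of_neg (by simp [hpq a h])]
    · rw [List.dropWhile_cons_of_neg h]

theorem filter_stripChars (l : List Char) :
    (PySem.Chars.stripChars l ['?']).filter (fun c => c != '?') =
      l.filter (fun c => c != '?') := by
  unfold PySem.Chars.stripChars
  have hpq : ∀ c : Char, (['?'].contains c) = true → (c != '?') = false := by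
    intro c hc; simp at hc; simp [hc]
  rw [List.filter_reverse, filter_dropWhile _ _ hpq, List.filter_reverse,
    filter_dropWhile _ _ hpq]
  simp

theorem altSum (x y : Int) (t : List Char) :
    ((PySem.List.pyRange 0 ((t.length : Int) - 1) 1).map
      (fun i => ((costDict x y).get? (String.ofList [PySem.List.pyGetD t i '?',
          PySem.List.pyGetD t (i + 1) '?'])).getD 0)).sum = pairSum x y t := by
  rcases t with _ | ⟨a, r⟩
  · rw [PySem.List.pyRange_one_eq_nil (a := 0) (b := ((([] : List Char).length : Int) - 1)) (by simp)]
    rfl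
  · have hlen : (((a :: r).length : Int)) - 1 = ((r.length : Nat) : Int) := by simp
    rw [hlen, PySem.List.pyRange_zero_nat, List.map_map]
    rw [← indexSum_eq_pairSum x y (a :: r)]
    have h3 : (a :: r).length - 1 = r.length := by simp
    rw [h3]
    congr 1
    apply List.map_congr_left
    intro i _
    have hc : ((i : Nat) : Int) + 1 = (((i + 1 : Nat)) : Int) := by push_cast; ring
    simp only [Function.comp_apply, hc, PySem.List.pyGetD_natCast, costFn, costGet]

theorem mem_stripChars {c : Char} {l chars : List Char}
    (h : c ∈ PySem.Chars.stripChars l chars) : c ∈ l := by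
  unfold PySem.Chars.stripChars at h
  rw [List.mem_reverse] at h
  have h1 := (List.dropWhile_suffix _).subset h
  rw [List.mem_reverse] at h1
  exact (List.dropWhile_suffix _).subset h1

theorem stripChars_head (l : List Char) (h : PySem.Chars.stripChars l ['?'] ≠ []) :
    (PySem.Chars.stripChars l ['?']).getD 0 '?' ≠ '?' := by
  unfold PySem.Chars.stripChars at *
  have hpre : (List.dropWhile (fun c => (['?'].contains c)) (List.dropWhile (fun c => (['?'].contains c)) l).reverse).reverse
      <+: List.dropWhile (fun c => (['?'].contains c)) l := by
    conv_rhs => rw [← List.reverse_reverse (List.dropWhile (fun c => (['?'].contains c)) l)]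
    exact List.reverse_prefix.mpr (List.dropWhile_suffix _)
  obtain ⟨t, ht⟩ := hpre
  rcases hc : (List.dropWhile (fun c => (['?'].contains c)) (List.dropWhile (fun c => (['?'].contains c)) l).reverse).reverse with _ | ⟨c, r⟩
  · exact absurd hc h
  · rw [hc] at ht
    have hAne : List.dropWhile (fun c => (['?'].contains c)) l ≠ [] := by
      intro h0; rw [h0] at ht; simp at ht
    have hhead := List.head_dropWhile_not (fun c => (['?'].contains c)) hAne
    have h2 : (List.dropWhile (fun c => (['?'].contains c)) l).head? = some c := by
      rw [← ht]; simp
    rw [List.head?_eq_head hAne] at h2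
    rw [Option.some.inj h2] at hhead
    simp only [List.getD_cons_zero]
    intro hcq
    rw [hcq] at hhead
    simp at hhead

theorem pySetD_natCast' (xs : List Char) (k : Nat) (v : Char) (hk : k < xs.length) :
    PySem.List.pySetD xs (k : Int) v = xs.set k v := by
  simp [PySem.List.pySetD, PySem.List.pySet?, PySem.List.pyIdx?, hk]

theorem getD_set_eq (xs : List Char) (k j : Nat) (v d : Char) (hk : k < xs.length) :
    (xs.set k v).getD j d = if j = k then v else xs.getD j d := by
  rcases eq_or_ne j k with rfl | hne
  · simp [List.getD, hk]
  · rw [List.getD, List.getD, List.getElem?_set_ne (by omega)]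
    simp [hne]

theorem filter_take_succ (T : List Char) (j : Nat) (hj : j < T.length) :
    (T.take (j + 1)).filter (fun c => c != '?') =
      (T.take j).filter (fun c => c != '?') ++ [T.getD j '?'].filter (fun c => c != '?') := by
  rw [List.take_add_one]
  have : T[j]? = some (T.getD j '?') := by
    rw [List.getElem?_eq_getElem hj, List.getD_eq_getElem T '?' hj]
  rw [this]
  simp

theorem lastNQ_succ_self (T : List Char) (j : Nat) (hj : j < T.length)
    (h : T.getD j '?' ≠ '?') : lastNQ T (j + 1) = T.getD j '?' := by
  unfold lastNQ
  rw [filter_take_succ T j hj]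
  have : [T.getD j '?'].filter (fun c => c != '?') = [T.getD j '?'] := by
    simp only [List.filter_cons, List.filter_nil]
    rw [if_pos (by simpa using h)]
  rw [this, List.getLastD_concat]

theorem lastNQ_succ_q (T : List Char) (j : Nat) (hj : j < T.length)
    (h : T.getD j '?' = '?') : lastNQ T (j + 1) = lastNQ T j := by
  unfold lastNQ
  rw [filter_take_succ T j hj, h]
  simp

theorem filter_take_ne_nil (T : List Char) (j : Nat) (h0 : T.getD 0 '?' ≠ '?')
    (hT : T ≠ []) (hj : 1 ≤ j) : (T.take j).filter (fun c => c != '?') ≠ [] := by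
  rcases T with _ | ⟨c, rest⟩
  · exact absurd rfl hT
  · rcases j with _ | j
    · omega
    · have hc : (c != '?') = true := by simpa using h0
      simp [List.take_succ_cons, List.filter_cons, hc]

theorem lastNQ_CJ (T : List Char) (j : Nat)
    (hCJ : ∀ c ∈ T, c = 'C' ∨ c = 'J' ∨ c = '?')
    (h0 : T.getD 0 '?' ≠ '?') (hT : T ≠ []) (hj : 1 ≤ j) :
    lastNQ T j = 'C' ∨ lastNQ T j = 'J' := by
  have hne := filter_take_ne_nil T j h0 hT hj
  have hmem : lastNQ T j ∈ (T.take j).filter (fun c => c != '?') := by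
    unfold lastNQ
    rw [List.getLastD_eq_getLast?, List.getLast?_eq_some_getLast hne]
    exact List.getLast_mem hne
  have h1 := List.of_mem_filter hmem
  have h2 : lastNQ T j ∈ T := List.take_subset _ _ (List.mem_of_mem_filter hmem)
  rcases hCJ _ h2 with h | h | h
  · exact Or.inl h
  · exact Or.inr h
  · rw [h] at h1; simp at h1

theorem getD_CJ (T : List Char) (j : Nat)
    (hCJ : ∀ c ∈ T, c = 'C' ∨ c = 'J' ∨ c = '?') (hj : j < T.length) :
    T.getD j '?' = 'C' ∨ T.getD j '?' = 'J' ∨ T.getD j '?' = '?' := by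
  rw [List.getD_eq_getElem T '?' hj]
  exact hCJ _ (List.getElem_mem hj)

theorem loop_invariant (x y : Int) (T : List Char)
    (hCJ : ∀ c ∈ T, c = 'C' ∨ c = 'J' ∨ c = '?')
    (h0 : T.getD 0 '?' ≠ '?') (k : Nat) (hk : k ≤ T.length - 1) :
    ((PySem.List.pyRange 0 (k : Int) 1).foldl (solveStep x y) (T, 0)).1.length = T.length ∧
    (∀ j : Nat, k ≤ j →
      ((PySem.List.pyRange 0 (k : Int) 1).foldl (solveStep x y) (T, 0)).1.getD j '?' = T.getD j '?') ∧
    (T.getD k '?' = '?' → 1 ≤ k ∧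
      ((PySem.List.pyRange 0 (k : Int) 1).foldl (solveStep x y) (T, 0)).1.getD (k - 1) '?' = lastNQ T k) ∧
    ((PySem.List.pyRange 0 (k : Int) 1).foldl (solveStep x y) (T, 0)).2 =
      pairSum x y ((T.take (k + 1)).filter (fun c => c != '?')) := by
  induction k with
  | zero =>
    rw [PySem.List.pyRange_one_eq_nil (a := 0) (b := ((0 : Nat) : Int)) (by simp)]
    refine ⟨rfl, fun j _ => rfl, fun hq => absurd hq h0, ?_⟩
    have hlen : ((T.take 1).filter (fun c => c != '?')).length ≤ 1 :=
      le_trans (List.length_filter_le _ _) (by simpa using List.length_take_le ..)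
    match hw : (T.take 1).filter (fun c => c != '?') with
    | [] => rfl
    | [_] => rfl
    | _ :: _ :: _ => rw [hw] at hlen; simp at hlen
  | succ k ih =>
    have hn : k + 2 ≤ T.length := by omega
    have hT : T ≠ [] := by intro h; rw [h] at hn; simp at hn
    obtain ⟨ih1, ih2, ih3, ih4⟩ := ih (by omega)
    have hsplit : PySem.List.pyRange 0 ((k + 1 : Nat) : Int) 1 =
        PySem.List.pyRange 0 ((k : Nat) : Int) 1 ++ [((k : Nat) : Int)] := by
      push_cast
      exact PySem.List.pyRange_one_succ_right (by positivity)
    rw [hsplit, List.foldl_append, List.foldl_cons, List.foldl_nil]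
    set st := (PySem.List.pyRange 0 ((k : Nat) : Int) 1).foldl (solveStep x y) (T, 0) with hst
    clear_value st
    -- the three reads of the loop body
    have hSk : PySem.List.pyGetD st.1 ((k : Nat) : Int) '?' = T.getD k '?' := by
      rw [PySem.List.pyGetD_natCast]; exact ih2 k le_rfl
    have hSk1 : PySem.List.pyGetD st.1 (((k : Nat) : Int) + 1) '?' = T.getD (k + 1) '?' := by
      have hc : ((k : Nat) : Int) + 1 = (((k + 1 : Nat)) : Int) := by push_cast; ring
      rw [hc, PySem.List.pyGetD_natCast]; exact ih2 (k + 1) (by omega)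
    simp only [solveStep, hSk, hSk1]
    by_cases hq : T.getD k '?' = '?'
    · -- S[i] == '?'
      obtain ⟨hk1, hprev⟩ := ih3 hq
      have hSkm1 : PySem.List.pyGetD st.1 (((k : Nat) : Int) - 1) '?' = lastNQ T k := by
        have hc : ((k : Nat) : Int) - 1 = (((k - 1 : Nat)) : Int) := by omega
        rw [hc, PySem.List.pyGetD_natCast]; exact hprev
      rw [if_pos hq]
      have hset : PySem.List.pySetD st.1 ((k : Nat) : Int) (lastNQ T k) =
          st.1.set k (lastNQ T k) := pySetD_natCast' _ _ _ (by omega)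
      have hLq : lastNQ T (k + 1) = lastNQ T k := lastNQ_succ_q T k (by omega) hq
      by_cases hq1 : T.getD (k + 1) '?' = '?'
      · -- next is '?': fill with prev, no cost
        rw [if_pos hq1, hSkm1, hset]
        refine ⟨by simpa using ih1, ?_, ?_, ?_⟩
        · intro j hj
          rw [getD_set_eq _ _ _ _ _ (by omega), if_neg (by omega)]
          exact ih2 j (by omega)
        · intro _
          refine ⟨by omega, ?_⟩
          rw [Nat.add_sub_cancel, getD_set_eq _ _ _ _ _ (by omega), if_pos rfl, hLq]
        · rw [filter_take_succ T (k + 1) (by omega), hq1]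
          simpa using ih4
      · -- next is a concrete letter
        rw [if_neg hq1, hSkm1]
        have hwne := filter_take_ne_nil T (k + 1) h0 hT (by omega)
        have hw : ((T.take (k + 1)).filter (fun c => c != '?')).getLastD 'C' = lastNQ T k := by
          rw [← hLq]; rfl
        have htail : (T.take (k + 1 + 1)).filter (fun c => c != '?') =
            (T.take (k + 1)).filter (fun c => c != '?') ++ [T.getD (k + 1) '?'] := by
          rw [filter_take_succ T (k + 1) (by omega)]
          congr 1
          simp only [List.filter_cons, List.filter_nil]
          rw [if_pos (by simpa using hq1)]
        have hps : pairSum x y ((T.take (k + 1 + 1)).filter (fun c => c != '?')) =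
            pairSum x y ((T.take (k + 1)).filter (fun c => c != '?')) +
              costFn x y (lastNQ T k) (T.getD (k + 1) '?') := by
          rw [htail, pairSum_append, if_neg hwne, hw]
        by_cases heq : T.getD (k + 1) '?' = lastNQ T k
        · -- same as previous letter: fill, no cost
          rw [if_pos heq, hset]
          refine ⟨by simpa using ih1, ?_, fun h => absurd h hq1, ?_⟩
          · intro j hj
            rw [getD_set_eq _ _ _ _ _ (by omega), if_neg (by omega)]
            exact ih2 j (by omega)
          · have hcc : costFn x y (lastNQ T k) (T.getD (k + 1) '?') = 0 := by
              rcases lastNQ_CJ T k hCJ h0 hT hk1 with hp | hp <;> rw [heq, hp] <;> rfl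
            rw [hps, hcc, ← ih4]
            ring
        · -- different letter: the two fill costs tie, 'J' is chosen, cost of the pair is added
          rw [if_neg heq]
          rcases lastNQ_CJ T k hCJ h0 hT hk1 with hp | hp <;>
            rcases getD_CJ T (k + 1) hCJ (by omega) with hx | hx | hx
          · exact absurd (hx.trans hp.symm) heq
          · rw [hp, hx] at hps ⊢
            have e1 : costGet x y (String.ofList ['C', 'C']) = 0 := rfl
            have e2 : costGet x y (String.ofList ['C', 'J']) = x := rfl
            have e3 : costGet x y (String.ofList ['J', 'J']) = 0 := rfl
            rw [e1, e2, e3, if_neg (by omega), pySetD_natCast' _ _ _ (by omega)]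
            refine ⟨by simpa using ih1, ?_, fun h => by simp at h, ?_⟩
            · intro j hj
              rw [getD_set_eq _ _ _ _ _ (by omega), if_neg (by omega)]
              exact ih2 j (by omega)
            · rw [hps, ← ih4]
              have e4 : costFn x y 'C' 'J' = x := rfl
              rw [e4]; ring
          · exact absurd hx hq1
          · rw [hp, hx] at hps ⊢
            have e1 : costGet x y (String.ofList ['J', 'C']) = y := rfl
            have e2 : costGet x y (String.ofList ['C', 'C']) = 0 := rfl
            have e3 : costGet x y (String.ofList ['J', 'J']) = 0 := rfl
            rw [e1, e2, e3, if_neg (by omega), pySetD_natCast' _ _ _ (by omega)]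
            refine ⟨by simpa using ih1, ?_, fun h => by simp at h, ?_⟩
            · intro j hj
              rw [getD_set_eq _ _ _ _ _ (by omega), if_neg (by omega)]
              exact ih2 j (by omega)
            · rw [hps, ← ih4]
              have e4 : costFn x y 'J' 'C' = y := rfl
              rw [e4]; ring
          · exact absurd (hx.trans hp.symm) heq
          · exact absurd hx hq1
    · -- S[i] is a concrete letter
      rw [if_neg hq]
      have hL1 : lastNQ T (k + 1) = T.getD k '?' := lastNQ_succ_self T k (by omega) hq
      by_cases hq1 : T.getD (k + 1) '?' = '?'
      · rw [if_neg (by simpa using hq1)]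
        refine ⟨ih1, fun j hj => ih2 j (by omega), ?_, ?_⟩
        · intro _
          refine ⟨by omega, ?_⟩
          rw [Nat.add_sub_cancel, ih2 k (by omega), ← hL1]
        · rw [filter_take_succ T (k + 1) (by omega), hq1]
          simpa using ih4
      · rw [if_pos (by simpa using hq1)]
        refine ⟨ih1, fun j hj => ih2 j (by omega), fun h => absurd h hq1, ?_⟩
        have hwne := filter_take_ne_nil T (k + 1) h0 hT (by omega)
        have hw : ((T.take (k + 1)).filter (fun c => c != '?')).getLastD 'C' = T.getD k '?' := by
          rw [← hL1]; rfl
        have htail : (T.take (k + 1 + 1)).filter (fun c => c != '?') =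
            (T.take (k + 1)).filter (fun c => c != '?') ++ [T.getD (k + 1) '?'] := by
          rw [filter_take_succ T (k + 1) (by omega)]
          congr 1
          simp only [List.filter_cons, List.filter_nil]
          rw [if_pos (by simpa using hq1)]
        rw [htail, pairSum_append, if_neg hwne, hw, ← ih4]
        rfl

theorem loop_result (x y : Int) (T : List Char)
    (hCJ : ∀ c ∈ T, c = 'C' ∨ c = 'J' ∨ c = '?')
    (h0 : T ≠ [] → T.getD 0 '?' ≠ '?') :
    ((PySem.List.pyRange 0 ((T.length : Int) - 1) 1).foldl (solveStep x y) (T, 0)).2 =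
      pairSum x y (T.filter (fun c => c != '?')) := by
  rcases T with _ | ⟨c, rest⟩
  · rw [PySem.List.pyRange_one_eq_nil (a := 0) (b := ((([] : List Char).length : Int) - 1)) (by simp)]
    rfl
  · have hlen : (((c :: rest).length : Int)) - 1 = ((rest.length : Nat) : Int) := by simp
    rw [hlen]
    have h4 := (loop_invariant x y (c :: rest) hCJ (h0 (by simp)) rest.length (by simp)).2.2.2
    rw [h4, List.take_of_length_le (by simp)]

theorem solve_eq (x y : Int) (s : String)
    (h : ∀ c ∈ s.toList, c = 'C' ∨ c = 'J' ∨ c = '?') :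
    solve x y s =
      pairSum x y ((PySem.Chars.stripChars s.toList ['?']).filter (fun c => c != '?')) :=
  loop_result x y (PySem.Chars.stripChars s.toList ['?'])
    (fun c hc => h c (mem_stripChars hc))
    (fun hne => stripChars_head s.toList hne)

theorem solve_alt_eq (x y : Int) (s : String) :
    solve_alt x y s = pairSum x y (s.toList.filter (fun c => c != '?')) :=
  altSum x y (s.toList.filter (fun c => c != '?'))

-- ===== VERDICT (by name: the statement is the Claim_ definition above) =====
theorem solve_spec : Claim_equal_solve := by
  intro x y s _ hpre
  unfold Spec_solve
  have hpre' : ∀ c ∈ s.toList, c = 'C' ∨ c = 'J' ∨ c = '?' := by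
    intro c hc
    have h2 : (c = 'C' ∨ c = 'J') ∨ c = '?' := by
      simpa using List.all_eq_true.mp hpre c hc
    tauto
  rw [solve_eq x y s hpre', filter_stripChars, solve_alt_eq]
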